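-- pv_equiv track=rewrite | github.com/lao1a0/WebSecMLLearnNote | Code/5/5.3.py | get_user_cmd_feature_new
-- ===== SOURCE A (Python) =====
-- def get_user_cmd_feature_new(user_cmd_list, dist):
--     user_cmd_feature = []
--
--     for cmd_list in user_cmd_list:
--         v = [0]*len(dist)
--         for i in range(0, len(dist)):
--             if dist[i] in cmd_list:
--                 v[i] += 1
--         user_cmd_feature.append(v)
--
--     return user_cmd_feature
-- ===== SOURCE B (Python) =====
-- def get_user_cmd_feature_new(user_cmd_list, dist):
--     # Build once: token -> list of its positions in dist (duplicates fan out).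
--     index = {}
--     for i, t in enumerate(dist):
--         index.setdefault(t, []).append(i)
--     out = []
--     n = len(dist)
--     for cmd_list in user_cmd_list:
--         v = [0] * n
--         for tok in cmd_list:
--             if tok in index:
--                 for p in index[tok]:
--                     v[p] = 1
--         out.append(v)
--     return out
-- ===== Notes on version B (the rewrite author's own statement) =====
-- stated objective: faster
-- what changed: Inverts the loops: a position-index dict over dist is built once, then each row is produced by iterating the command tokens and setting the indexed positions to 1, instead of rescanning each cmd_list for every dist token.
import Mathlib
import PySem

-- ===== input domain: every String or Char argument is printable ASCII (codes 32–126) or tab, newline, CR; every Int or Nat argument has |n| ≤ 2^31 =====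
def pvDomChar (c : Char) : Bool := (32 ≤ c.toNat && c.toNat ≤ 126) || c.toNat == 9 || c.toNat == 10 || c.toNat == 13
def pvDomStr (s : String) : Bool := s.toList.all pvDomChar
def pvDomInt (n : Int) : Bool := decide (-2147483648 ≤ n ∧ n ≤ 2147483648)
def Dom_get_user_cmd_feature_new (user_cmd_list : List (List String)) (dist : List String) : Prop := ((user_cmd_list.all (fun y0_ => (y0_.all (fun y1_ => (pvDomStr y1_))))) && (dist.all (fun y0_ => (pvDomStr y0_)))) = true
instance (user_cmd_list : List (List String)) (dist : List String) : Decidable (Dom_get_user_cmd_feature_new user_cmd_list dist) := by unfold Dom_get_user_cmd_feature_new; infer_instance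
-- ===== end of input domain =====

-- B inverts A's loops: a position-index dict over dist is built once, then each row is
-- produced from the command tokens; same return value, alternative decomposition.

-- ===== PORT A =====
-- one row of A: v = [0]*len(dist); for i in range(0, len(dist)): if dist[i] in cmd_list: v[i] += 1
-- i ranges over 0..len(dist)-1, so dist[i] and v[i] are always in range: pyGetD/pySetD are exact here.
def pvRowA (c : List String) (dist : List String) : List Int :=
  (PySem.List.pyRange 0 (dist.length : Int) 1).foldl
    (fun v i =>
      if PySem.List.pyGetD dist i "" ∈ c then
        PySem.List.pySetD v i (PySem.List.pyGetD v i 0 + 1)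
      else v)
    (List.replicate dist.length 0)

def get_user_cmd_feature_new (user_cmd_list : List (List String)) (dist : List String) : List (List Int) :=
  user_cmd_list.foldl (fun acc c => acc ++ [pvRowA c dist]) []

-- ===== PORT B =====
-- index = {}; for i, t in enumerate(dist): index.setdefault(t, []).append(i)
def pvIndexB (dist : List String) : PySem.Dict String (List Int) :=
  (PySem.List.enumerate dist).foldl
    (fun d p => d.modify p.2 [] (fun l => l ++ [p.1])) PySem.Dict.empty

-- v = [0]*n; for tok in cmd_list: if tok in index: for p in index[tok]: v[p] = 1
-- every stored p is a valid index into v, so pySetD is exact here.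
def pvRowB (idx : PySem.Dict String (List Int)) (n : Nat) (c : List String) : List Int :=
  c.foldl
    (fun v tok =>
      if idx.contains tok then
        (idx.getD tok []).foldl (fun v p => PySem.List.pySetD v p 1) v
      else v)
    (List.replicate n 0)

def get_user_cmd_feature_new_alt (user_cmd_list : List (List String)) (dist : List String) : List (List Int) :=
  let idx := pvIndexB dist
  user_cmd_list.foldl (fun acc c => acc ++ [pvRowB idx dist.length c]) []

-- ===== PRECONDITION & SPEC =====
def Spec_get_user_cmd_feature_new (user_cmd_list : List (List String)) (dist : List String) (out : List (List Int)) : Prop := out = get_user_cmd_feature_new_alt user_cmd_list dist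
instance (user_cmd_list : List (List String)) (dist : List String) (out : List (List Int)) : Decidable (Spec_get_user_cmd_feature_new user_cmd_list dist out) := by unfold Spec_get_user_cmd_feature_new; infer_instance

-- ===== CLAIM (what is proved, stated in full; the proofs are below) =====
def Claim_equal_get_user_cmd_feature_new : Prop := ∀ (user_cmd_list : List (List String)) (dist : List String), Dom_get_user_cmd_feature_new user_cmd_list dist → Spec_get_user_cmd_feature_new user_cmd_list dist (get_user_cmd_feature_new user_cmd_list dist)

-- ===== LEMMAS AND PROOFS =====

-- proof-side description of the positions of token t in xs, starting at offset s
def pvPos (xs : List String) (t : String) (s : Int) : List Int :=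
  match xs with
  | [] => []
  | x :: xs => (if x == t then [s] else []) ++ pvPos xs t (s + 1)

theorem pvEnum_filter (xs : List String) (t : String) (s : Int) :
    (((PySem.List.enumerate xs s).filter (fun p => p.2 == t)).map (fun p => p.1))
      = pvPos xs t s := by
  induction xs generalizing s with
  | nil => simp [pvPos, PySem.List.enumerate_nil]
  | cons x xs ih =>
    simp only [PySem.List.enumerate_cons, List.filter_cons, pvPos]
    by_cases h : x == t <;> simp [h, ih]

theorem pvIndexB_getD (dist : List String) (t : String) :
    (pvIndexB dist).getD t [] = pvPos dist t 0 := by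
  unfold pvIndexB
  have h : (PySem.List.enumerate dist 0).foldl
      (fun d p => d.modify p.2 [] (fun l => l ++ [p.1])) PySem.Dict.empty
      = ((PySem.List.enumerate dist 0).map Prod.swap).foldl
          (fun d q => d.modify q.1 [] (fun l => l ++ [q.2])) PySem.Dict.empty := by
    rw [List.foldl_map]
    rfl
  rw [h, PySem.Dict.getD_foldl_modify_append, PySem.Dict.getD_empty]
  rw [← pvEnum_filter dist t 0]
  simp [List.filter_map, Function.comp_def, Prod.swap]

theorem pvIndexB_contains (dist : List String) (t : String) :
    (pvIndexB dist).contains t = decide (t ∈ dist) := by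
  unfold pvIndexB
  rw [PySem.Dict.contains_eq_decide_mem_keys,
      PySem.Dict.keys_foldl_modify_key (PySem.List.enumerate dist 0) (fun p => p.2) []
        (fun _ p l => l ++ [p.1]) PySem.Dict.empty]
  simp [PySem.Set.mem_update, PySem.Dict.keys_empty, PySem.List.map_snd_enumerate]

theorem pvPos_mem (xs : List String) (t : String) (s j : Int) :
    j ∈ pvPos xs t s ↔ s ≤ j ∧ j - s < xs.length ∧ xs.getD (j - s).toNat "" = t := by
  induction xs generalizing s with
  | nil =>
    simp only [pvPos, List.not_mem_nil, false_iff, List.length_nil]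
    rintro ⟨h1, h2, -⟩
    omega
  | cons x xs ih =>
    simp only [pvPos, List.mem_append, ih, List.length_cons]
    constructor
    · rintro (h | ⟨h1, h2, h3⟩)
      · by_cases hx : x == t
        · rw [if_pos hx] at h
          simp only [List.mem_singleton] at h
          have hxt : x = t := by simpa using hx
          refine ⟨by omega, by push_cast; omega, ?_⟩
          have h0 : (j - s).toNat = 0 := by omega
          rw [h0, List.getD_cons_zero, hxt]
        · rw [if_neg hx] at h
          simp at h
      · refine ⟨by omega, by push_cast at h2 ⊢; omega, ?_⟩
        have hk : (j - s).toNat = (j - (s + 1)).toNat + 1 := by omega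
        rw [hk, List.getD_cons_succ]
        exact h3
    · rintro ⟨h1, h2, h3⟩
      by_cases hj : j = s
      · have h0 : (j - s).toNat = 0 := by omega
        rw [h0, List.getD_cons_zero] at h3
        left
        simp [h3, hj]
      · right
        refine ⟨by omega, by push_cast at h2 ⊢; omega, ?_⟩
        have hk : (j - s).toNat = (j - (s + 1)).toNat + 1 := by omega
        rw [hk, List.getD_cons_succ] at h3
        exact h3

theorem pvPos_mem_zero (xs : List String) (t : String) (j : Nat) (hj : j < xs.length) :
    ((j : Int) ∈ pvPos xs t 0 ↔ xs.getD j "" = t) := by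
  rw [pvPos_mem]
  constructor
  · rintro ⟨-, -, h⟩; simpa using h
  · intro h; exact ⟨by omega, by simpa using hj, by simpa using h⟩

theorem pvPos_bounds (xs : List String) (t : String) (p : Int) (hp : p ∈ pvPos xs t 0) :
    0 ≤ p ∧ p.toNat < xs.length := by
  rw [pvPos_mem] at hp
  omega

-- inner B loop: set every listed position to 1
theorem pvSetOnes (ps : List Int) (v : List Int)
    (hb : ∀ p ∈ ps, 0 ≤ p ∧ p.toNat < v.length) (j : Nat) :
    (ps.foldl (fun v p => PySem.List.pySetD v p 1) v)[j]?
      = if (j : Int) ∈ ps then some 1 else v[j]? := by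
  induction ps generalizing v with
  | nil => simp
  | cons p ps ih =>
    simp only [List.foldl_cons]
    rw [ih _ (by intro q hq; have := hb q (List.mem_cons_of_mem _ hq)
                 simpa [PySem.List.length_pySetD] using this)]
    have hp := hb p (List.mem_cons_self ..)
    rw [PySem.List.pySetD_of_nonneg _ _ hp.1]
    by_cases hmem : (j : Int) ∈ ps
    · simp [hmem]
    · simp only [hmem, if_false, List.mem_cons]
      by_cases hjp : (j : Int) = p
      · have hpj : p.toNat = j := by omega
        subst hpj
        simp [List.getElem?_set_self (show p.toNat < v.length by omega), hjp]
      · have hne : p.toNat ≠ j := by omega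
        simp [List.getElem?_set_ne hne, hjp]

theorem pvLen_setOnes (ps : List Int) (v : List Int) :
    (ps.foldl (fun v p => PySem.List.pySetD v p 1) v).length = v.length := by
  induction ps generalizing v with
  | nil => rfl
  | cons p ps ih => simp [ih, PySem.List.length_pySetD]

-- B row characterisation
theorem pvRowB_getElem (dist : List String) (c : List String) (v : List Int)
    (hv : v.length = dist.length) (j : Nat) :
    (c.foldl
      (fun v tok =>
        if (pvIndexB dist).contains tok then
          ((pvIndexB dist).getD tok []).foldl (fun v p => PySem.List.pySetD v p 1) v
        else v) v)[j]?
      = if j < dist.length ∧ dist.getD j "" ∈ c then some 1 else v[j]? := by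
  induction c generalizing v with
  | nil => simp
  | cons t c ih =>
    simp only [List.foldl_cons]
    have hstep : ∀ w : List Int, w.length = dist.length →
        ((if (pvIndexB dist).contains t then
            ((pvIndexB dist).getD t []).foldl (fun v p => PySem.List.pySetD v p 1) w
          else w)[j]? = if j < dist.length ∧ dist.getD j "" = t then some 1 else w[j]?)
          ∧ (if (pvIndexB dist).contains t then
            ((pvIndexB dist).getD t []).foldl (fun v p => PySem.List.pySetD v p 1) w
          else w).length = dist.length := by
      intro w hw
      rw [pvIndexB_contains, pvIndexB_getD]
      by_cases hc : t ∈ dist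
      · rw [if_pos (by simpa using hc)]
        constructor
        · rw [pvSetOnes _ _ (by intro p hp; have := pvPos_bounds dist t p hp; omega) j]
          by_cases hj : j < dist.length
          · by_cases hm : dist.getD j "" = t
            · rw [if_pos ((pvPos_mem_zero dist t j hj).mpr hm), if_pos ⟨hj, hm⟩]
            · rw [if_neg (fun h => hm ((pvPos_mem_zero dist t j hj).mp h)),
                  if_neg (by rintro ⟨-, h⟩; exact hm h)]
          · have hnm : (j : Int) ∉ pvPos dist t 0 := by
              intro hmem
              have := pvPos_bounds dist t _ hmem
              omega
            rw [if_neg hnm, if_neg (by rintro ⟨h, -⟩; exact hj h)]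
        · rw [pvLen_setOnes]
          exact hw
      · have hne : ¬ (j < dist.length ∧ dist.getD j "" = t) := by
          rintro ⟨hj, ht⟩
          rw [List.getD_eq_getElem _ _ hj] at ht
          exact hc (ht ▸ List.getElem_mem hj)
        rw [if_neg (by simpa using hc), if_neg hne]
        exact ⟨rfl, hw⟩
    obtain ⟨h1, h2⟩ := hstep v hv
    rw [ih _ h2, h1]
    by_cases hj : j < dist.length
    · by_cases ht : dist.getD j "" = t
      · by_cases hcc : dist.getD j "" ∈ c
        · rw [if_pos ⟨hj, hcc⟩, if_pos ⟨hj, List.mem_cons.mpr (Or.inl ht)⟩]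
        · rw [if_neg (by rintro ⟨-, h⟩; exact hcc h), if_pos ⟨hj, ht⟩,
              if_pos ⟨hj, List.mem_cons.mpr (Or.inl ht)⟩]
      · by_cases hcc : dist.getD j "" ∈ c
        · rw [if_pos ⟨hj, hcc⟩, if_pos ⟨hj, List.mem_cons.mpr (Or.inr hcc)⟩]
        · rw [if_neg (by rintro ⟨-, h⟩; exact hcc h), if_neg (by rintro ⟨-, h⟩; exact ht h),
              if_neg (by rintro ⟨-, h⟩
                         rcases List.mem_cons.mp h with h | h
                         · exact ht h
                         · exact hcc h)]
    · rw [if_neg (fun h => hj h.1), if_neg (fun h => hj h.1), if_neg (fun h => hj h.1)]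

-- A row characterisation: fold over any Nodup in-bounds index list
theorem pvRowA_fold (dist c : List String) (l : List Nat) (v : List Int)
    (hnd : l.Nodup) (hb : ∀ i ∈ l, i < v.length) (j : Nat) :
    (l.foldl (fun v i =>
        if dist.getD i "" ∈ c then v.set i (v.getD i 0 + 1) else v) v)[j]?
      = if j ∈ l ∧ dist.getD j "" ∈ c then some (v.getD j 0 + 1) else v[j]? := by
  induction l generalizing v with
  | nil => simp
  | cons k l ih =>
    simp only [List.foldl_cons]
    have hk := hb k (List.mem_cons_self ..)
    have hnd' := (List.nodup_cons.mp hnd).2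
    have hknl := (List.nodup_cons.mp hnd).1
    set w := if dist.getD k "" ∈ c then v.set k (v.getD k 0 + 1) else v with hwdef
    have hwlen : w.length = v.length := by
      rw [hwdef]; split <;> simp
    rw [ih _ hnd' (by intro i hi; rw [hwlen]; exact hb i (List.mem_cons_of_mem _ hi))]
    by_cases hjl : j ∈ l
    · have hjk : j ≠ k := fun h => hknl (h ▸ hjl)
      have hwg : w.getD j 0 = v.getD j 0 := by
        rw [hwdef]; split
        · rw [List.getD, List.getD, List.getElem?_set_ne (fun h => hjk h.symm)]
          rfl
        · rfl
      by_cases hcj : dist.getD j "" ∈ c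
      · rw [if_pos ⟨hjl, hcj⟩, if_pos ⟨List.mem_cons.mpr (Or.inr hjl), hcj⟩, hwg]
      · have hwj : w[j]? = v[j]? := by
          rw [hwdef]; split
          · exact List.getElem?_set_ne (fun h => hjk h.symm)
          · rfl
        rw [if_neg (by rintro ⟨-, h⟩; exact hcj h),
            if_neg (by rintro ⟨-, h⟩; exact hcj h), hwj]
    · rw [if_neg (by rintro ⟨h, -⟩; exact hjl h)]
      by_cases hjk : j = k
      · subst hjk
        by_cases hcj : dist.getD j "" ∈ c
        · have hwj : w[j]? = some (v.getD j 0 + 1) := by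
            rw [hwdef, if_pos hcj]
            exact List.getElem?_set_self hk
          rw [hwj, if_pos ⟨List.mem_cons_self .., hcj⟩]
        · have hwj : w[j]? = v[j]? := by rw [hwdef, if_neg hcj]
          rw [hwj, if_neg (by rintro ⟨-, h⟩; exact hcj h)]
      · have hwj : w[j]? = v[j]? := by
          rw [hwdef]; split
          · exact List.getElem?_set_ne (fun h => hjk h.symm)
          · rfl
        rw [hwj, if_neg ?_]
        rintro ⟨h, -⟩
        rcases List.mem_cons.mp h with h | h
        · exact hjk h
        · exact hjl h

theorem pvRow_eq (c : List String) (dist : List String) :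
    pvRowA c dist = pvRowB (pvIndexB dist) dist.length c := by
  apply List.ext_getElem?
  intro j
  unfold pvRowA pvRowB
  have hfold : (PySem.List.pyRange 0 (dist.length : Int) 1).foldl
      (fun v i => if PySem.List.pyGetD dist i "" ∈ c then
          PySem.List.pySetD v i (PySem.List.pyGetD v i 0 + 1) else v)
      (List.replicate dist.length 0)
      = (List.range dist.length).foldl
          (fun v i => if dist.getD i "" ∈ c then v.set i (v.getD i 0 + 1) else v)
          (List.replicate dist.length (0 : Int)) := by
    rw [PySem.List.pyRange_zero_nat, List.foldl_map]
    simp only [PySem.List.pyGetD_natCast, PySem.List.pySetD_natCast]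
  rw [hfold,
    pvRowA_fold dist c (List.range dist.length) _ (List.nodup_range)
      (by intro i hi; simpa using List.mem_range.mp hi) j,
    pvRowB_getElem dist c _ (by simp) j]
  by_cases hj : j < dist.length
  · by_cases hc : dist.getD j "" ∈ c
    · rw [if_pos ⟨List.mem_range.mpr hj, hc⟩, if_pos ⟨hj, hc⟩]
      simp
    · rw [if_neg (by rintro ⟨-, h⟩; exact hc h), if_neg (by rintro ⟨-, h⟩; exact hc h)]
  · rw [if_neg (by rintro ⟨h, -⟩; exact hj (List.mem_range.mp h)), if_neg (fun h => hj h.1)]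

-- ===== VERDICT (by name: the statement is the Claim_ definition above) =====
theorem get_user_cmd_feature_new_spec : Claim_equal_get_user_cmd_feature_new := by
  intro user_cmd_list dist _
  unfold Spec_get_user_cmd_feature_new get_user_cmd_feature_new get_user_cmd_feature_new_alt
  rw [PySem.List.foldl_append_singleton_eq_map, PySem.List.foldl_append_singleton_eq_map]
  simp only [List.nil_append]
  exact List.map_congr_left (fun c _ => pvRow_eq c dist)
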